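-- pv_equiv track=rewrite | github.com/rbf22/biomod | biomod/io/mmtf.py | recursive_decode
-- ===== SOURCE A (Python) =====
-- def recursive_decode(integers, bits=16):
--     new = []
--     power = 2 ** (bits - 1)
--     cutoff = [power - 1, 0 - power]
--     index = 0
--     while index < len(integers):
--         value = 0
--         while integers[index] in cutoff:
--             value += integers[index]
--             index += 1
--             if index >= len(integers) or integers[index] == 0:
--                 break
--         if index < len(integers):
--             value += integers[index]
--             index += 1
--         new.append(value)
--     return new
-- ===== SOURCE B (Python) =====
-- def recursive_decode(integers, bits=16):
--     power = 2 ** (bits - 1)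
--     cutoff = (power - 1, 0 - power)
--     new = []
--     value = 0
--     pending = False
--     for n in integers:
--         value += n
--         # a value outside the markers (or a zero terminating a marker run) flushes the group
--         if n not in cutoff or (n == 0 and pending):
--             new.append(value)
--             value = 0
--             pending = False
--         else:
--             pending = True
--     if pending:
--         new.append(value)
--     return new
-- ===== Notes on version B (the rewrite author's own statement) =====
-- stated objective: simpler
-- what changed: Replaced A's index-based outer/inner while loops by a single flat for-loop over the elements with a running accumulator and a pending flag, flushing a group when the element is not a marker (or is a zero terminating a marker run).
import Mathlib
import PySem

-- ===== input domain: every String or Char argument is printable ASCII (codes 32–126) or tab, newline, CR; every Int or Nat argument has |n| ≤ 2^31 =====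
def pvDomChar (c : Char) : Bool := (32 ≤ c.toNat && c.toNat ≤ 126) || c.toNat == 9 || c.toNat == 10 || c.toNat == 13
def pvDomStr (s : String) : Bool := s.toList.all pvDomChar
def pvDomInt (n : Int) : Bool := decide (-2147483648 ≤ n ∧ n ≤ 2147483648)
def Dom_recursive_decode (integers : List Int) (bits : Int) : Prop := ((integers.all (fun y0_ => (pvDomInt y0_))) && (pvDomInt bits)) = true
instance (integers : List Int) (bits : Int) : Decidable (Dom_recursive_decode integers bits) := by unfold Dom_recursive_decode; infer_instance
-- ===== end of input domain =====

-- B replaces A's index-based nested while loops by one flat pass with a running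
-- accumulator and a pending flag (objective: simpler); return values proved equal on all inputs.

-- ===== PORT A =====
-- membership test `n in cutoff` with cutoff = [2**(bits-1)-1, -2**(bits-1)].
-- Exact for every Int bits: for bits ≤ 0 Python's 2**(bits-1) is a float; its cutoff entries
-- equal an integer only through rounding: 2**(bits-1)-1 == -1.0 exactly when bits ≤ -53 and
-- -(2**(bits-1)) == 0.0 exactly when bits ≤ -1074 (IEEE-754 round-to-even; verified in Python);
-- otherwise both entries are fractional and no int is in cutoff.
def pvCut (bits x : Int) : Bool :=
  if 1 ≤ bits then x == 2 ^ (bits - 1).toNat - 1 || x == -(2 ^ (bits - 1).toNat)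
  else (x == -1 && bits ≤ -53) || (x == 0 && bits ≤ -1074)

-- A's inner while loop: consume leading cutoff values into `value`, breaking when the
-- list ends or the next element is 0; returns (value, remaining suffix).
def pvInnerA (bits : Int) : List Int → Int → Int × List Int
  | [], v => (v, [])
  | x :: rest, v =>
    if pvCut bits x then
      match rest with
      | [] => (v + x, [])
      | y :: _ => if y == 0 then (v + x, rest) else pvInnerA bits rest (v + x)
    else (v, x :: rest)

theorem pvInnerA_len_le (bits : Int) (xs : List Int) (v : Int) :
    (pvInnerA bits xs v).2.length ≤ xs.length := by
  induction xs generalizing v with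
  | nil => simp [pvInnerA]
  | cons x rest ih =>
    by_cases hc : pvCut bits x = true
    · cases rest with
      | nil => simp [pvInnerA, hc]
      | cons y rest' =>
        by_cases hy : (y == 0) = true
        · simp [pvInnerA, hc, hy]
        · have := ih (v + x)
          rw [show pvInnerA bits (x :: y :: rest') v = pvInnerA bits (y :: rest') (v + x) from by
            simp [pvInnerA, hc, hy]]
          simp only [List.length_cons] at *
          omega
    · simp [pvInnerA, hc]

-- A's outer while loop.
def pvOuterA (bits : Int) (xs : List Int) : List Int :=
  match xs with
  | [] => []
  | x :: rest =>
    match h2 : (pvInnerA bits (x :: rest) 0).2 with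
    | [] => [(pvInnerA bits (x :: rest) 0).1]
    | y :: rest' => ((pvInnerA bits (x :: rest) 0).1 + y) :: pvOuterA bits rest'
  termination_by xs.length
  decreasing_by
    have hle := pvInnerA_len_le bits (x :: rest) 0
    rw [h2] at hle
    simp at hle ⊢
    omega

def recursive_decode (integers : List Int) (bits : Int) : List Int :=
  pvOuterA bits integers

-- ===== PORT B =====
-- B's single for-loop, carrying (output so far, running value, pending flag).
def pvLoopB (bits : Int) : List Int → List Int → Int → Bool → List Int
  | [], acc, v, pending => if pending then acc ++ [v] else acc
  | n :: rest, acc, v, pending =>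
    let v' := v + n
    if !(pvCut bits n) || (n == 0 && pending) then pvLoopB bits rest (acc ++ [v']) 0 false
    else pvLoopB bits rest acc v' true

def recursive_decode_alt (integers : List Int) (bits : Int) : List Int :=
  pvLoopB bits integers [] 0 false

-- ===== PRECONDITION & SPEC =====
def Spec_recursive_decode (integers : List Int) (bits : Int) (out : List Int) : Prop := out = recursive_decode_alt integers bits
instance (integers : List Int) (bits : Int) (out : List Int) : Decidable (Spec_recursive_decode integers bits out) := by unfold Spec_recursive_decode; infer_instance

-- ===== CLAIM (what is proved, stated in full; the proofs are below) =====
def Claim_equal_recursive_decode : Prop := ∀ (integers : List Int) (bits : Int), Dom_recursive_decode integers bits → Spec_recursive_decode integers bits (recursive_decode integers bits)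

-- ===== LEMMAS AND PROOFS =====

theorem pvOuterA_nil (bits : Int) : pvOuterA bits [] = [] := by
  rw [pvOuterA.eq_def]

-- the accumulator of pvLoopB factors out
theorem pvLoopB_acc (bits : Int) (xs acc : List Int) (v : Int) (p : Bool) :
    pvLoopB bits xs acc v p = acc ++ pvLoopB bits xs [] v p := by
  induction xs generalizing acc v p with
  | nil => cases p <;> simp [pvLoopB]
  | cons n rest ih =>
    simp only [pvLoopB]
    split
    · rw [ih (acc ++ [v + n]) 0 false, ih ([] ++ [v + n]) 0 false]
      simp
    · exact ih _ _ _

-- "mid-inner-loop" state of A: just after consuming a cutoff element, before the break check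
def pvInnerCont (bits v : Int) : List Int → Int × List Int
  | [] => (v, [])
  | y :: rest => if y == 0 then (v, y :: rest) else pvInnerA bits (y :: rest) v

def pvFinishA (bits : Int) (p : Int × List Int) : List Int :=
  match p.2 with
  | [] => [p.1]
  | y :: rest' => (p.1 + y) :: pvOuterA bits rest'

theorem pvInnerA_cons_cut (bits : Int) (x : Int) (rest : List Int) (v : Int)
    (h : pvCut bits x = true) :
    pvInnerA bits (x :: rest) v = pvInnerCont bits (v + x) rest := by
  cases rest with
  | nil => simp [pvInnerA, pvInnerCont, h]
  | cons y rest' =>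
    by_cases hy : y = 0 <;> simp [pvInnerA, pvInnerCont, h, hy]

theorem pvOuterA_cons (bits : Int) (x : Int) (rest : List Int) :
    pvOuterA bits (x :: rest) = pvFinishA bits (pvInnerA bits (x :: rest) 0) := by
  rw [pvOuterA.eq_def]
  split
  · rename_i heq
    exact absurd heq (by simp)
  · rename_i y0 rest0 heq
    cases heq
    split
    · rename_i heq2
      simp [pvFinishA, heq2]
    · rename_i y rest' heq2
      simp [pvFinishA, heq2]

-- simultaneous induction: B's flat loop from the fresh state equals A's outer loop,
-- and from the pending state equals A resumed mid-inner-loop.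
theorem pv_key (N : ℕ) : ∀ (xs : List Int), xs.length ≤ N → ∀ (bits : Int),
    (pvLoopB bits xs [] 0 false = pvOuterA bits xs) ∧
    (∀ v, pvLoopB bits xs [] v true = pvFinishA bits (pvInnerCont bits v xs)) := by
  induction N with
  | zero =>
    intro xs h bits
    have hx : xs = [] := by cases xs <;> simp_all
    subst hx
    exact ⟨by simp [pvLoopB, pvOuterA_nil], fun v => by simp [pvLoopB, pvInnerCont, pvFinishA]⟩
  | succ N ih =>
    intro xs h bits
    cases xs with
    | nil =>
      exact ⟨by simp [pvLoopB, pvOuterA_nil], fun v => by simp [pvLoopB, pvInnerCont, pvFinishA]⟩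
    | cons n rest =>
      have hr : rest.length ≤ N := by simpa using h
      have IH := ih rest hr bits
      constructor
      · -- fresh state
        rw [pvOuterA_cons]
        by_cases hc : pvCut bits n = true
        · rw [pvInnerA_cons_cut _ _ _ _ hc]
          have hstep : pvLoopB bits (n :: rest) [] 0 false = pvLoopB bits rest [] (0 + n) true := by
            simp [pvLoopB, hc]
          rw [hstep, IH.2 (0 + n)]
        · have hc' : pvCut bits n = false := by simpa using hc
          have hstep : pvLoopB bits (n :: rest) [] 0 false
              = pvLoopB bits rest ([] ++ [0 + n]) 0 false := by
            simp [pvLoopB, hc']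
          rw [hstep, pvLoopB_acc]
          simp [pvInnerA, hc', pvFinishA, IH.1]
      · -- pending state
        intro v
        by_cases hz : n = 0
        · subst hz
          have hstep : pvLoopB bits (0 :: rest) [] v true
              = pvLoopB bits rest ([] ++ [v + 0]) 0 false := by
            simp [pvLoopB]
          rw [hstep, pvLoopB_acc]
          simp [pvInnerCont, pvFinishA, IH.1]
        · by_cases hc : pvCut bits n = true
          · have hstep : pvLoopB bits (n :: rest) [] v true = pvLoopB bits rest [] (v + n) true := by
              simp [pvLoopB, hc, hz]
            have hcont : pvInnerCont bits v (n :: rest) = pvInnerCont bits (v + n) rest := by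
              rw [pvInnerCont, if_neg (by simpa using hz), pvInnerA_cons_cut _ _ _ _ hc]
            rw [hstep, hcont, IH.2 (v + n)]
          · have hc' : pvCut bits n = false := by simpa using hc
            have hstep : pvLoopB bits (n :: rest) [] v true
                = pvLoopB bits rest ([] ++ [v + n]) 0 false := by
              simp [pvLoopB, hc']
            rw [hstep, pvLoopB_acc]
            simp [pvInnerCont, hz, pvInnerA, hc', pvFinishA, IH.1]

-- ===== VERDICT (by name: the statement is the Claim_ definition above) =====
theorem recursive_decode_spec : Claim_equal_recursive_decode := by
  intro integers bits _
  unfold Spec_recursive_decode recursive_decode recursive_decode_alt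
  exact ((pv_key integers.length integers le_rfl bits).1).symm
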